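-- pv_equiv track=rewrite | github.com/Mikolmisol/RNAJP-On-Google-Colab | get_JAR3D_paras.py | calc_seq_mark_diff
-- ===== SOURCE A (Python) =====
-- def calc_seq_mark_diff(seq_mark0,seq_mark):
--     list_core_res_idx1 = []
--     for i in range(len(seq_mark0)):
--         if seq_mark0[i] == "N":
--             list_core_res_idx1.append(i)
--     list_insertion_num1 = [list_core_res_idx1[i+1]-list_core_res_idx1[i]-1 for i in range(len(list_core_res_idx1)-1)]
--
--     list_core_res_idx2 = []
--     for i in range(len(seq_mark)):
--         if seq_mark[i] == "N":
--             list_core_res_idx2.append(i)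
--     list_insertion_num2 = [list_core_res_idx2[i+1]-list_core_res_idx2[i]-1 for i in range(len(list_core_res_idx2)-1)]
--
--     if len(list_insertion_num1) != len(list_insertion_num2):
--         #print ("Two sequence marks have different core residues")
--         #print (seq_mark0,seq_mark)
--         return 10000
--
--     list_diff = [abs(x-y) for x,y in zip(list_insertion_num1,list_insertion_num2)]
--     diff = sum(list_diff)
--     return diff
-- ===== SOURCE B (Python) =====
-- def _gaps(s):
--     # one pass: count non-'N' chars since the previous 'N'
--     gs = []
--     seen = False
--     cnt = 0
--     for ch in s:
--         if ch == "N":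
--             if seen:
--                 gs.append(cnt)
--             seen = True
--             cnt = 0
--         else:
--             cnt += 1
--     return gs
--
-- def calc_seq_mark_diff(seq_mark0, seq_mark):
--     g1 = _gaps(seq_mark0)
--     g2 = _gaps(seq_mark)
--     if len(g1) != len(g2):
--         return 10000
--     return sum(abs(x - y) for x, y in zip(g1, g2))
-- ===== Notes on version B (the rewrite author's own statement) =====
-- stated objective: simpler
-- what changed: Replaces the index-list construction plus a positional difference comprehension with a single pass per string that counts the run of non-'N' characters between consecutive 'N's directly; no index lists are ever built.
import Mathlib
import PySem

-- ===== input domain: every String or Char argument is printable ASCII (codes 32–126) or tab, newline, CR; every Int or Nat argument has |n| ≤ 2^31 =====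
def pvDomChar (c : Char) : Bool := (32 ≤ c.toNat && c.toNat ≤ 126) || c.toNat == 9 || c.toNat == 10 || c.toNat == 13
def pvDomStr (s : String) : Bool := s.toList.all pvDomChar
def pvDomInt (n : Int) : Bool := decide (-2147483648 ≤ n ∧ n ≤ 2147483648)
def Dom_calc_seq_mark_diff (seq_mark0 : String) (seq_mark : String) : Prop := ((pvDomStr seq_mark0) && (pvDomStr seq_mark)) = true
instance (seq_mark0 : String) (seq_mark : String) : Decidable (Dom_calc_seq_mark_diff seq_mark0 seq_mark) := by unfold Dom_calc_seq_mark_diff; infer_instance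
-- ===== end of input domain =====

-- B replaces the index-list + positional-difference comprehension by a single run-counting pass per string (simpler decomposition).


-- ===== PORT A =====
-- `for i in range(len(s)): if s[i] == "N": append(i)`; i is always in range, so s[i]
-- never raises and `pyGetD … ' '` is exact here.
def pvIdxLoop (cs : List Char) : List Int :=
  (PySem.List.pyRange 0 (cs.length : Int) 1).foldl
    (fun acc i => if PySem.List.pyGetD cs i ' ' = 'N' then acc ++ [i] else acc) []

-- `[l[i+1]-l[i]-1 for i in range(len(l)-1)]`; both indices are in range, pyGetD exact.
def pvInsNums (l : List Int) : List Int :=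
  (PySem.List.pyRange 0 ((l.length : Int) - 1) 1).map
    (fun i => PySem.List.pyGetD l (i + 1) 0 - PySem.List.pyGetD l i 0 - 1)

def calc_seq_mark_diff (seq_mark0 : String) (seq_mark : String) : Int :=
  let list_core_res_idx1 := pvIdxLoop seq_mark0.toList
  let list_insertion_num1 := pvInsNums list_core_res_idx1
  let list_core_res_idx2 := pvIdxLoop seq_mark.toList
  let list_insertion_num2 := pvInsNums list_core_res_idx2
  if list_insertion_num1.length ≠ list_insertion_num2.length then 10000
  else
    let list_diff := (list_insertion_num1.zip list_insertion_num2).map (fun p => |p.1 - p.2|)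
    list_diff.sum

-- ===== PORT B =====
-- single pass: state (gaps so far, an 'N' was seen, non-'N' count since the last 'N')
def pvGapsB (s : String) : List Int :=
  (s.toList.foldl
    (fun (st : List Int × Bool × Int) ch =>
      if ch = 'N' then ((if st.2.1 then st.1 ++ [st.2.2] else st.1), true, 0)
      else (st.1, st.2.1, st.2.2 + 1))
    ([], false, 0)).1

def calc_seq_mark_diff_alt (seq_mark0 : String) (seq_mark : String) : Int :=
  let g1 := pvGapsB seq_mark0
  let g2 := pvGapsB seq_mark
  if g1.length ≠ g2.length then 10000
  else ((g1.zip g2).map (fun p => |p.1 - p.2|)).sum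

-- ===== PRECONDITION & SPEC =====
def Spec_calc_seq_mark_diff (seq_mark0 : String) (seq_mark : String) (out : Int) : Prop := out = calc_seq_mark_diff_alt seq_mark0 seq_mark
instance (seq_mark0 : String) (seq_mark : String) (out : Int) : Decidable (Spec_calc_seq_mark_diff seq_mark0 seq_mark out) := by unfold Spec_calc_seq_mark_diff; infer_instance

-- ===== CLAIM (what is proved, stated in full; the proofs are below) =====
def Claim_equal_calc_seq_mark_diff : Prop := ∀ (seq_mark0 : String) (seq_mark : String), Dom_calc_seq_mark_diff seq_mark0 seq_mark → Spec_calc_seq_mark_diff seq_mark0 seq_mark (calc_seq_mark_diff seq_mark0 seq_mark)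

-- ===== LEMMAS AND PROOFS =====

-- positions (as Ints, offset k) of 'N' in a char list
def pvIdxs : List Char → Int → List Int
  | [], _ => []
  | c :: t, k => if c = 'N' then k :: pvIdxs t (k + 1) else pvIdxs t (k + 1)

-- B's run-counting, after the first 'N' has been seen, with current count cnt
def pvGapsFrom : List Char → Int → List Int
  | [], _ => []
  | c :: t, cnt => if c = 'N' then cnt :: pvGapsFrom t 0 else pvGapsFrom t (cnt + 1)

-- B's run-counting from the start (before any 'N')
def pvGaps0 : List Char → List Int
  | [] => []
  | c :: t => if c = 'N' then pvGapsFrom t 0 else pvGaps0 t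

-- A's index loop, seen through enumerate, builds exactly pvIdxs
lemma pvEnumFold (cs : List Char) : ∀ (s : Int) (acc : List Int),
    (PySem.List.enumerate cs s).foldl
      (fun acc (p : Int × Char) => if p.2 = 'N' then acc ++ [p.1] else acc) acc
      = acc ++ pvIdxs cs s := by
  induction cs with
  | nil => intro s acc; simp [PySem.List.enumerate_nil, pvIdxs]
  | cons c t ih =>
    intro s acc
    rw [PySem.List.enumerate_cons]
    by_cases h : c = 'N' <;> simp [List.foldl_cons, h, ih, pvIdxs]

lemma pvIdxLoop_eq (cs : List Char) : pvIdxLoop cs = pvIdxs cs 0 := by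
  unfold pvIdxLoop
  have he := PySem.List.enumerate_eq_map_pyRange cs ' '
  have : (PySem.List.pyRange 0 (cs.length : Int) 1).foldl
      (fun acc i => if PySem.List.pyGetD cs i ' ' = 'N' then acc ++ [i] else acc) []
      = (PySem.List.enumerate cs 0).foldl
        (fun acc (p : Int × Char) => if p.2 = 'N' then acc ++ [p.1] else acc) [] := by
    rw [he, List.foldl_map]
    simp [PySem.List.len]
  rw [this, pvEnumFold]
  simp

-- the comprehension over consecutive indices is zipWith on the list and its tail
lemma pvInsNums_eq (l : List Int) :
    pvInsNums l = List.zipWith (fun a b => b - a - 1) l l.tail := by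
  unfold pvInsNums
  rw [PySem.List.pyRange_one]
  simp only [List.map_map]
  apply List.ext_getElem
  · simp only [List.length_map, List.length_range, List.length_zipWith, List.length_tail]
    omega
  · intro i h1 h2
    simp only [List.getElem_map, List.getElem_range, Function.comp_apply, List.getElem_zipWith,
      List.getElem_tail]
    have hlen : i + 1 < l.length := by
      simp [List.length_zipWith, List.length_tail] at h2; omega
    have h1' : (0 : Int) + (i : Int) + 1 = ((i + 1 : Nat) : Int) := by push_cast; ring
    have h2' : (0 : Int) + (i : Int) = ((i : Nat) : Int) := by ring
    rw [h1', h2', PySem.List.pyGetD_natCast, PySem.List.pyGetD_natCast]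
    simp [List.getD_eq_getElem?_getD, List.getElem?_eq_getElem hlen,
      List.getElem?_eq_getElem (by omega : i < l.length)]

-- B after the first 'N': gaps are consecutive differences of the positions
lemma pvGapsFrom_eq (cs : List Char) : ∀ (k cnt : Int),
    pvGapsFrom cs cnt
      = List.zipWith (fun a b => b - a - 1) ((k - cnt - 1) :: pvIdxs cs k) (pvIdxs cs k) := by
  induction cs with
  | nil => intro k cnt; simp [pvGapsFrom, pvIdxs]
  | cons c t ih =>
    intro k cnt
    by_cases h : c = 'N'
    · simp only [pvGapsFrom, pvIdxs, h, if_true]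
      rw [ih (k + 1) 0]
      rw [List.zipWith_cons_cons]
      have e1 : k - (k - cnt - 1) - 1 = cnt := by ring
      have e2 : k + 1 - 0 - 1 = k := by ring
      rw [e1, e2]
    · simp only [pvGapsFrom, pvIdxs, h, if_false]
      rw [ih (k + 1) (cnt + 1)]
      congr 2
      ring

lemma pvGaps0_eq (cs : List Char) : ∀ (k : Int),
    pvGaps0 cs = List.zipWith (fun a b => b - a - 1) (pvIdxs cs k) (pvIdxs cs k).tail := by
  induction cs with
  | nil => intro k; simp [pvGaps0, pvIdxs]
  | cons c t ih =>
    intro k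
    by_cases h : c = 'N'
    · simp only [pvGaps0, pvIdxs, h, if_true, List.tail_cons]
      rw [pvGapsFrom_eq t (k + 1) 0]
      congr 1; ring
    · simp only [pvGaps0, pvIdxs, h, if_false]
      exact ih (k + 1)

-- B's fold computes pvGapsFrom once an 'N' has been seen
lemma pvFold_seen (cs : List Char) : ∀ (gs : List Int) (cnt : Int),
    (cs.foldl
      (fun (st : List Int × Bool × Int) ch =>
        if ch = 'N' then ((if st.2.1 then st.1 ++ [st.2.2] else st.1), true, 0)
        else (st.1, st.2.1, st.2.2 + 1))
      (gs, true, cnt)).1 = gs ++ pvGapsFrom cs cnt := by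
  induction cs with
  | nil => intro gs cnt; simp [pvGapsFrom]
  | cons c t ih =>
    intro gs cnt
    by_cases h : c = 'N' <;> simp [List.foldl_cons, h, ih, pvGapsFrom]

-- B's fold computes pvGaps0 before any 'N'
lemma pvFold_unseen (cs : List Char) : ∀ (cnt : Int),
    (cs.foldl
      (fun (st : List Int × Bool × Int) ch =>
        if ch = 'N' then ((if st.2.1 then st.1 ++ [st.2.2] else st.1), true, 0)
        else (st.1, st.2.1, st.2.2 + 1))
      ([], false, cnt)).1 = pvGaps0 cs := by
  induction cs with
  | nil => intro cnt; simp [pvGaps0]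
  | cons c t ih =>
    intro cnt
    by_cases h : c = 'N' <;> simp [List.foldl_cons, h, ih, pvFold_seen, pvGaps0]

-- the two gap lists coincide on every string
lemma pvGapLists_eq (s : String) : pvInsNums (pvIdxLoop s.toList) = pvGapsB s := by
  rw [pvIdxLoop_eq, pvInsNums_eq, pvGapsB, pvFold_unseen]
  exact (pvGaps0_eq s.toList 0).symm

-- ===== VERDICT (by name: the statement is the Claim_ definition above) =====
theorem calc_seq_mark_diff_spec : Claim_equal_calc_seq_mark_diff := by
  intro s0 s _
  show _ = _
  simp only [calc_seq_mark_diff, calc_seq_mark_diff_alt, pvGapLists_eq]
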